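-- pv_equiv track=rewrite | github.com/Eteriasticot/Maze_generator | Maze.py | adjacencies
-- ===== SOURCE A (Python) =====
-- dir = {(1, 0): 'r', (-1, 0):'l', (0, 1):'u', (0, -1):'d', (0, 0):'n'}
--
-- def r_grid(n:int, m:int) -> list:
--     r = []
--     for i in range(m):
--         for j in range(n):
--             r.append((j+1, i+1))
--     return r
--
-- def adjacencies(n:int, m:int) -> dict:
--     adj = dict()
--     nodes = r_grid(n, m)
--     for i in nodes:
--         for j in dir:
--             if ((i[0]+j[0], i[1]+j[1]) in nodes) and (dir[(j)]!='n'):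
--                 if i in adj:
--                     adj[i].append(dir[(j)])
--                 else:
--                     adj[i] = [dir[(j)]]
--     return adj
-- ===== SOURCE B (Python) =====
-- def adjacencies(n: int, m: int) -> dict:
--     adj = dict()
--     for y in range(1, m + 1):
--         for x in range(1, n + 1):
--             labels = []
--             if x < n:
--                 labels.append('r')
--             if x > 1:
--                 labels.append('l')
--             if y < m:
--                 labels.append('u')
--             if y > 1:
--                 labels.append('d')
--             if labels:
--                 adj[(x, y)] = labels
--     return adj
-- ===== Notes on version B (the rewrite author's own statement) =====
-- stated objective: faster
-- what changed: Replaced the materialized node list, the offset dict and the linear 'in nodes' membership scan per neighbour with a single pass over coordinates that derives each node's labels directly from boundary comparisons (x<n, x>1, y<m, y>1).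
import Mathlib
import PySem

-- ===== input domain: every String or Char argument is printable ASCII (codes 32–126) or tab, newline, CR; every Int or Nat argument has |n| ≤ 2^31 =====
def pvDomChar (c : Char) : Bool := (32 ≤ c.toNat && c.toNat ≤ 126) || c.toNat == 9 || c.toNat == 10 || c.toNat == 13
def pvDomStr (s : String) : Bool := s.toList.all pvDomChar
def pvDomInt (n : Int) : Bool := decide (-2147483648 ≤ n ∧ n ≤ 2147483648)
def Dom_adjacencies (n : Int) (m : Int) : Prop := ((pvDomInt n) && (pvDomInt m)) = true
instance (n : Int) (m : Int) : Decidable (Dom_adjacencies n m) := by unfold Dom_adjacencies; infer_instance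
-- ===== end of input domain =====

-- B computes each node's labels directly from boundary comparisons in one O(nm) pass,
-- dropping A's node list, offset dict and per-neighbour linear membership scan.

-- ===== PORT A =====
-- the module-level `dir` dict, as its insertion-ordered item list
def dirItems : List ((Int × Int) × String) :=
  [((1, 0), "r"), ((-1, 0), "l"), ((0, 1), "u"), ((0, -1), "d"), ((0, 0), "n")]

def r_grid (n : Int) (m : Int) : List (Int × Int) :=
  (PySem.List.pyRange 0 m 1).foldl (fun r i =>
    (PySem.List.pyRange 0 n 1).foldl (fun r j => r ++ [(j + 1, i + 1)]) r) []

-- the dict adj, hand-rolled over the required flat-triple shape (key = first two components):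
-- `i in adj` and `adj[i].append(...)` (first-match, in-place)
def aHas (adj : List (Int × Int × List String)) (k : Int × Int) : Bool :=
  adj.any (fun e => e.1 == k.1 && e.2.1 == k.2)

def aApp (adj : List (Int × Int × List String)) (k : Int × Int) (s : String) :
    List (Int × Int × List String) :=
  match adj with
  | [] => []
  | e :: rest =>
    if e.1 = k.1 ∧ e.2.1 = k.2 then (e.1, e.2.1, e.2.2 ++ [s]) :: rest
    else e :: aApp rest k s

def adjacencies (n : Int) (m : Int) : List (Int × Int × List String) :=
  let nodes := r_grid n m
  nodes.foldl (fun adj i =>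
    dirItems.foldl (fun adj j =>
      if nodes.contains (i.1 + j.1.1, i.2 + j.1.2) && j.2 != "n" then
        if aHas adj i then aApp adj i j.2 else adj ++ [(i.1, i.2, [j.2])]
      else adj) adj) []

-- ===== PORT B =====
def adjacencies_alt (n : Int) (m : Int) : List (Int × Int × List String) :=
  (PySem.List.pyRange 1 (m + 1) 1).foldl (fun adj y =>
    (PySem.List.pyRange 1 (n + 1) 1).foldl (fun adj x =>
      let labels := (if x < n then ["r"] else []) ++ (if 1 < x then ["l"] else []) ++
                    (if y < m then ["u"] else []) ++ (if 1 < y then ["d"] else [])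
      if labels = [] then adj else adj ++ [(x, y, labels)]) adj) []

-- ===== PRECONDITION & SPEC =====
def Spec_adjacencies (n : Int) (m : Int) (out : List (Int × Int × List String)) : Prop := out = adjacencies_alt n m
instance (n : Int) (m : Int) (out : List (Int × Int × List String)) : Decidable (Spec_adjacencies n m out) := by unfold Spec_adjacencies; infer_instance

-- ===== CLAIM (what is proved, stated in full; the proofs are below) =====
def Claim_equal_adjacencies : Prop := ∀ (n : Int) (m : Int), Dom_adjacencies n m → Spec_adjacencies n m (adjacencies n m)

-- ===== LEMMAS AND PROOFS =====

-- B's label list for node (x,y)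
def labelsOf (n m x y : Int) : List String :=
  (if x < n then ["r"] else []) ++ (if 1 < x then ["l"] else []) ++
  (if y < m then ["u"] else []) ++ (if 1 < y then ["d"] else [])

-- the dict entry contributed by one node
def entryL (i : Int × Int) (ls : List String) : List (Int × Int × List String) :=
  if ls = [] then [] else [(i.1, i.2, ls)]

theorem r_grid_eq (n m : Int) :
    r_grid n m = (List.range m.toNat).flatMap
      (fun (i : Nat) => (List.range n.toNat).map (fun (j : Nat) => ((j : Int) + 1, (i : Int) + 1))) := by
  unfold r_grid
  rw [PySem.List.foldl_congr_mem _ _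
    (fun r i => r ++ (PySem.List.pyRange 0 n 1).map (fun j => (j + 1, i + 1))) _
    (fun acc i _ => PySem.List.foldl_append_singleton_eq_map _ _ _)]
  rw [PySem.List.foldl_append_eq_flatMap, List.nil_append, PySem.List.pyRange_zero m,
    PySem.List.pyRange_zero n]
  simp only [List.flatMap_map, List.map_map]
  rfl

theorem mem_r_grid (n m : Int) (p : Int × Int) :
    p ∈ r_grid n m ↔ 1 ≤ p.1 ∧ p.1 ≤ n ∧ 1 ≤ p.2 ∧ p.2 ≤ m := by
  obtain ⟨a, b⟩ := p
  rw [r_grid_eq]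
  simp only [List.mem_flatMap, List.mem_map, List.mem_range, Prod.mk.injEq]
  constructor
  · rintro ⟨i, hi, j, hj, h1, h2⟩
    omega
  · rintro ⟨h1, h2, h3, h4⟩
    exact ⟨(b - 1).toNat, by omega, (a - 1).toNat, by omega, by omega, by omega⟩

theorem nodup_r_grid (n m : Int) : (r_grid n m).Nodup := by
  rw [r_grid_eq, List.nodup_flatMap]
  refine ⟨fun i _ => (List.nodup_range).map (fun a b h => by simpa using h), ?_⟩
  refine List.Pairwise.imp ?_ List.nodup_range
  intro a b hab p hp hp'
  simp only [List.mem_map, List.mem_range] at hp hp'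
  obtain ⟨j, _, hj⟩ := hp
  obtain ⟨j', _, hj'⟩ := hp'
  have := congrArg Prod.snd hj
  have := congrArg Prod.snd hj'
  simp at *
  omega

theorem aHas_append (adj adj' : List (Int × Int × List String)) (k : Int × Int) :
    aHas (adj ++ adj') k = (aHas adj k || aHas adj' k) := by
  simp [aHas]

theorem aHas_entryL (i k : Int × Int) (ls : List String) (h : k ≠ i) :
    aHas (entryL i ls) k = false := by
  simp only [entryL, aHas]
  split
  · simp
  · simp only [List.any_cons, List.any_nil, Bool.or_false, Bool.and_eq_false_iff,
      beq_eq_false_iff_ne, ne_eq]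
    by_cases h1 : i.1 = k.1
    · right
      intro h2
      exact h (Prod.ext h1.symm h2.symm)
    · left
      exact h1

theorem aApp_fresh (adj : List (Int × Int × List String)) (i : Int × Int) (ls : List String)
    (s : String) (h : aHas adj i = false) :
    aApp (adj ++ [(i.1, i.2, ls)]) i s = adj ++ [(i.1, i.2, ls ++ [s])] := by
  induction adj with
  | nil => simp [aApp]
  | cons e rest ih =>
    simp only [aHas, List.any_cons, Bool.or_eq_false_iff, Bool.and_eq_false_iff] at h
    obtain ⟨h1, h2⟩ := h
    simp only [List.cons_append, aApp]
    rw [if_neg, ih (by simpa [aHas] using h2)]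
    rintro ⟨ha, hb⟩
    rcases h1 with h1 | h1 <;> simp at h1 <;> tauto

-- one conditional label step of A's inner dir-loop, on a fresh key
theorem addLabel_acc (adj : List (Int × Int × List String)) (i : Int × Int) (ls : List String)
    (s : String) (h : aHas adj i = false) :
    (if aHas (adj ++ entryL i ls) i then aApp (adj ++ entryL i ls) i s
     else (adj ++ entryL i ls) ++ [(i.1, i.2, [s])]) = adj ++ entryL i (ls ++ [s]) := by
  by_cases hls : ls = []
  · subst hls
    simp [entryL, h]
  · have hne : ls ++ [s] ≠ [] := by simp
    simp only [entryL, if_neg hls, if_neg hne]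
    rw [if_pos, aApp_fresh adj i ls s h]
    rw [aHas_append]
    simp [aHas]

-- one conditional label step of A's inner dir-loop, on a fresh key
theorem step_eq (adj : List (Int × Int × List String)) (i : Int × Int) (ls : List String)
    (c : Bool) (s : String) (h : aHas adj i = false) (hs : (s != "n") = true) :
    (if c && (s != "n") then
        if aHas (adj ++ entryL i ls) i then aApp (adj ++ entryL i ls) i s
        else (adj ++ entryL i ls) ++ [(i.1, i.2, [s])]
      else adj ++ entryL i ls)
    = adj ++ entryL i (ls ++ (if c then [s] else [])) := by
  cases c
  · simp
  · simp only [hs, Bool.and_self, if_pos]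
    exact addLabel_acc adj i ls s h

-- A's inner dir-loop over a fresh in-grid node = append of B's entry
theorem inner_loop_eq (n m : Int) (adj : List (Int × Int × List String)) (i : Int × Int)
    (hi : i ∈ r_grid n m) (h : aHas adj i = false) :
    dirItems.foldl (fun adj j =>
      if (r_grid n m).contains (i.1 + j.1.1, i.2 + j.1.2) && j.2 != "n" then
        if aHas adj i then aApp adj i j.2 else adj ++ [(i.1, i.2, [j.2])]
      else adj) adj = adj ++ entryL i (labelsOf n m i.1 i.2) := by
  obtain ⟨x, y⟩ := i
  have hb := (mem_r_grid n m (x, y)).1 hi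
  simp only at hb
  have hcont : ∀ a b : Int,
      (r_grid n m).contains (a, b) = decide (1 ≤ a ∧ a ≤ n ∧ 1 ≤ b ∧ b ≤ m) := by
    intro a b
    rw [Bool.eq_iff_iff]
    simp [mem_r_grid]
  have hr : ((("r" : String) != "n")) = true := by decide
  have hl : ((("l" : String) != "n")) = true := by decide
  have hu : ((("u" : String) != "n")) = true := by decide
  have hd : ((("d" : String) != "n")) = true := by decide
  have hn : ((("n" : String) != "n")) = false := by decide
  simp only [dirItems, List.foldl_cons, List.foldl_nil, hcont, add_zero]
  have d1 : (decide (1 ≤ x + 1 ∧ x + 1 ≤ n ∧ 1 ≤ y ∧ y ≤ m)) = decide (x < n) :=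
    decide_eq_decide.2 (by omega)
  have d2 : (decide (1 ≤ x + -1 ∧ x + -1 ≤ n ∧ 1 ≤ y ∧ y ≤ m)) = decide (1 < x) :=
    decide_eq_decide.2 (by omega)
  have d3 : (decide (1 ≤ x ∧ x ≤ n ∧ 1 ≤ y + 1 ∧ y + 1 ≤ m)) = decide (y < m) :=
    decide_eq_decide.2 (by omega)
  have d4 : (decide (1 ≤ x ∧ x ≤ n ∧ 1 ≤ y + -1 ∧ y + -1 ≤ m)) = decide (1 < y) :=
    decide_eq_decide.2 (by omega)
  rw [d1, d2, d3, d4]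
  simp only [hn, Bool.and_false, Bool.false_eq_true, if_false]
  have h1 : (if (decide (x < n) && ("r" != "n")) = true then
        if aHas adj (x, y) = true then aApp adj (x, y) "r" else adj ++ [(x, y, ["r"])]
      else adj) = adj ++ entryL (x, y) (if x < n then ["r"] else []) := by
    by_cases hc : x < n <;> simp [hc, h, entryL]
  rw [h1, step_eq adj (x, y) _ (decide (1 < x)) "l" h hl,
      step_eq adj (x, y) _ (decide (y < m)) "u" h hu,
      step_eq adj (x, y) _ (decide (1 < y)) "d" h hd]
  simp only [labelsOf, decide_eq_true_eq, List.append_assoc]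

theorem outer_loop_eq (n m : Int) (l : List (Int × Int)) (adj : List (Int × Int × List String))
    (hsub : ∀ i ∈ l, i ∈ r_grid n m) (hnd : l.Nodup) (hfresh : ∀ i ∈ l, aHas adj i = false) :
    l.foldl (fun adj i =>
      dirItems.foldl (fun adj j =>
        if (r_grid n m).contains (i.1 + j.1.1, i.2 + j.1.2) && j.2 != "n" then
          if aHas adj i then aApp adj i j.2 else adj ++ [(i.1, i.2, [j.2])]
        else adj) adj) adj
    = adj ++ l.flatMap (fun i => entryL i (labelsOf n m i.1 i.2)) := by
  induction l generalizing adj with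
  | nil => simp
  | cons i t ih =>
    rw [List.foldl_cons, inner_loop_eq n m adj i (hsub i (by simp)) (hfresh i (by simp))]
    rw [ih _ (fun i' hi' => hsub i' (List.mem_cons_of_mem _ hi')) hnd.of_cons ?_]
    · simp [List.flatMap_cons]
    · intro i' hi'
      rw [aHas_append, hfresh i' (List.mem_cons_of_mem _ hi'), aHas_entryL i i' _ ?_,
        Bool.or_false]
      exact fun hh => (List.nodup_cons.1 hnd).1 (hh ▸ hi')

theorem alt_eq (n m : Int) :
    adjacencies_alt n m = (List.range m.toNat).flatMap (fun (i : Nat) =>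
      (List.range n.toNat).flatMap (fun (j : Nat) =>
        entryL ((j : Int) + 1, (i : Int) + 1) (labelsOf n m ((j : Int) + 1) ((i : Int) + 1)))) := by
  unfold adjacencies_alt
  have hstep : ∀ (y : Int) (adj : List (Int × Int × List String)),
      (PySem.List.pyRange 1 (n + 1) 1).foldl (fun adj x =>
        let labels := (if x < n then ["r"] else []) ++ (if 1 < x then ["l"] else []) ++
                      (if y < m then ["u"] else []) ++ (if 1 < y then ["d"] else [])
        if labels = [] then adj else adj ++ [(x, y, labels)]) adj
      = adj ++ (PySem.List.pyRange 1 (n + 1) 1).flatMap (fun x => entryL (x, y) (labelsOf n m x y)) := by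
    intro y adj
    rw [show (fun (adj : List (Int × Int × List String)) (x : Int) =>
        let labels := (if x < n then ["r"] else []) ++ (if 1 < x then ["l"] else []) ++
                      (if y < m then ["u"] else []) ++ (if 1 < y then ["d"] else [])
        if labels = [] then adj else adj ++ [(x, y, labels)])
      = fun adj x => adj ++ entryL (x, y) (labelsOf n m x y) from ?_]
    · exact PySem.List.foldl_append_eq_flatMap _ _ _
    · funext adj x
      show (if (labelsOf n m x y) = [] then adj else adj ++ [(x, y, labelsOf n m x y)])
        = adj ++ entryL (x, y) (labelsOf n m x y)
      rw [entryL]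
      split <;> simp
  rw [PySem.List.foldl_congr_mem _ _ (fun adj y => adj ++ (PySem.List.pyRange 1 (n + 1) 1).flatMap
        (fun x => entryL (x, y) (labelsOf n m x y))) _ (fun acc y _ => hstep y acc)]
  rw [PySem.List.foldl_append_eq_flatMap, List.nil_append]
  have hr : ∀ (b : Int), PySem.List.pyRange 1 (b + 1) 1
      = (List.range b.toNat).map (fun (k : Nat) => (k : Int) + 1) := by
    intro b
    rw [PySem.List.pyRange_one]
    rw [show (b + 1 - 1).toNat = b.toNat from by omega]
    exact List.map_congr_left (fun k _ => by omega)
  rw [hr m, hr n]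
  simp only [List.flatMap_map]

-- ===== VERDICT (by name: the statement is the Claim_ definition above) =====
theorem adjacencies_spec : Claim_equal_adjacencies := by
  intro n m _
  unfold Spec_adjacencies
  rw [adjacencies, alt_eq]
  rw [outer_loop_eq n m (r_grid n m) [] (fun _ h => h) (nodup_r_grid n m) (fun _ _ => rfl)]
  rw [r_grid_eq]
  simp [List.flatMap_assoc, List.flatMap_map]
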